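-- pv_equiv track=rewrite | github.com/ernestyu/clawlingua | src/clawlingua/config.py | _parse_voice_slots
-- ===== SOURCE A (Python) =====
-- from typing import Any
--
-- _VOICE_SLOT_ENV_KEYS = (
--     "CLAWLINGUA_TTS_EDGE_VOICE1",
--     "CLAWLINGUA_TTS_EDGE_VOICE2",
--     "CLAWLINGUA_TTS_EDGE_VOICE3",
--     "CLAWLINGUA_TTS_EDGE_VOICE4",
-- )
--
-- def _parse_voice_slots(data: dict[str, Any]) -> list[str]:
--     voices: list[str] = []
--     seen: set[str] = set()
--     for key in _VOICE_SLOT_ENV_KEYS: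
--         value = data.get(key)
--         if value is None:
--             continue
--         for item in str(value).split(","):
--             voice = item.strip()
--             if not voice or voice in seen:
--                 continue
--             voices.append(voice)
--             seen.add(voice)
--     return voices
-- ===== SOURCE B (Python) =====
-- from typing import Any
--
-- _VOICE_SLOT_ENV_KEYS = (
--     "CLAWLINGUA_TTS_EDGE_VOICE1",
--     "CLAWLINGUA_TTS_EDGE_VOICE2",
--     "CLAWLINGUA_TTS_EDGE_VOICE3",
--     "CLAWLINGUA_TTS_EDGE_VOICE4",
-- )
--
-- def _parse_voice_slots(data: dict[str, Any]) -> list[str]: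
--     def pieces(keys):
--         # recursion on the key tuple: this key's stripped pieces, then the rest
--         if not keys:
--             return []
--         rest = pieces(keys[1:])
--         value = data.get(keys[0])
--         if value is None:
--             return rest
--         return [p.strip() for p in str(value).split(",")] + rest
--
--     def dedup(xs):
--         # back-to-front recursion: dedup the prefix, then append the last
--         # element if it is non-empty and not already kept
--         if not xs:
--             return []
--         out = dedup(xs[:-1])
--         last = xs[-1]
--         if last and last not in out:
--             out = out + [last]
--         return out
--
--     return dedup(pieces(_VOICE_SLOT_ENV_KEYS))
-- ===== Notes on version B (the rewrite author's own statement) =====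
-- stated objective: alternative
-- what changed: B is fully recursive and keeps no auxiliary seen-set: a structural recursion over the key tuple builds the flat list of stripped pieces, and a back-to-front recursion on that list dedups by membership in the already-deduplicated prefix result (out = dedup(xs[:-1]); append xs[-1] if non-empty and not in out), replacing A's interleaved iterative loop with a set accumulator.
import Mathlib
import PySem

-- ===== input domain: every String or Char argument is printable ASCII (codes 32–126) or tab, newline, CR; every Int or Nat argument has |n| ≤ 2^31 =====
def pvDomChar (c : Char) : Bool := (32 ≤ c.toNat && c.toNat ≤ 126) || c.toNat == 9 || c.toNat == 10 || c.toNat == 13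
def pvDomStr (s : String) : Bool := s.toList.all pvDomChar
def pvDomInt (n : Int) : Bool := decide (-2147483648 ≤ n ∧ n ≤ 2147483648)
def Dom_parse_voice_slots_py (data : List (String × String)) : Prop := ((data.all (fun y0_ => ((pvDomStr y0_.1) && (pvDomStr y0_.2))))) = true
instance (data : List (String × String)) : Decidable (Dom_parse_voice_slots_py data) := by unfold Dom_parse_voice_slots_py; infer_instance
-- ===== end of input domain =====

-- B is fully recursive and keeps no seen-set: a recursion over the key tuple collects the
-- stripped pieces, and a back-to-front recursion dedups against the already-built prefix
-- result; objective: alternative (no speed claim).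

def pvVoiceKeys : List String :=
  ["CLAWLINGUA_TTS_EDGE_VOICE1", "CLAWLINGUA_TTS_EDGE_VOICE2",
   "CLAWLINGUA_TTS_EDGE_VOICE3", "CLAWLINGUA_TTS_EDGE_VOICE4"]

-- value.split(","): the separator is the non-empty literal ",", so split? is always some (exact)
def pvSplitComma (s : String) : List String := (PySem.Str.split? s ",").getD []

-- ===== PORT A =====
-- A's inner-loop body: strip, skip empty or seen, else append and add to seen
def pvStepA (st : List String × PySem.Set String) (item : String) : List String × PySem.Set String :=
  let voice := PySem.Str.strip item
  if voice = "" ∨ st.2.contains voice then st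
  else (st.1 ++ [voice], st.2.add voice)

-- literal transliteration: outer loop over the key tuple, inner loop over the comma-split
-- pieces, state = (voices, seen); 'data.get(key)' is first-match lookup on the assoc list.
def parse_voice_slots_py (data : List (String × String)) : List String :=
  (pvVoiceKeys.foldl
    (fun st key =>
      match (PySem.Dict.mk data).get? key with
      | none => st
      | some value => (pvSplitComma value).foldl pvStepA st)
    ([], PySem.Set.empty)).1

-- ===== PORT B =====
-- pieces(keys): recursion on the key list — this key's stripped pieces, then the rest
def pvPieces (data : List (String × String)) : List String → List String
  | [] => []
  | k :: ks =>
    let rest := pvPieces data ks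
    match (PySem.Dict.mk data).get? k with
    | none => rest
    | some value => (pvSplitComma value).map PySem.Str.strip ++ rest

-- dedup(xs): back-to-front recursion — dedup the prefix xs[:-1], then append the last
-- element if non-empty and not already kept
def pvDedupR (xs : List String) : List String :=
  if _h : xs = [] then []
  else
    let out := pvDedupR xs.dropLast
    let last := xs.getLast!
    if last ≠ "" ∧ last ∉ out then out ++ [last] else out
termination_by xs.length
decreasing_by
  have := List.length_pos_of_ne_nil _h
  simp [List.length_dropLast]; omega

def parse_voice_slots_py_alt (data : List (String × String)) : List String :=
  pvDedupR (pvPieces data pvVoiceKeys)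

-- ===== PRECONDITION & SPEC =====
def Spec_parse_voice_slots_py (data : List (String × String)) (out : List String) : Prop := out = parse_voice_slots_py_alt data
instance (data : List (String × String)) (out : List String) : Decidable (Spec_parse_voice_slots_py data out) := by unfold Spec_parse_voice_slots_py; infer_instance

-- ===== CLAIM (what is proved, stated in full; the proofs are below) =====
def Claim_equal_parse_voice_slots_py : Prop := ∀ (data : List (String × String)), Dom_parse_voice_slots_py data → Spec_parse_voice_slots_py data (parse_voice_slots_py data)

-- ===== LEMMAS AND PROOFS =====

-- the one-list 'append if non-empty and new' step (A's state collapsed to its first component)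
def pvStepL (l : List String) (v : String) : List String :=
  if v ≠ "" ∧ v ∉ l then l ++ [v] else l

-- pvDedupR is the left fold of pvStepL (back-to-front recursion = front-to-back fold)
lemma pvDedupR_eq_foldl (xs : List String) : pvDedupR xs = xs.foldl pvStepL [] := by
  induction xs using List.reverseRecOn with
  | nil => simp [pvDedupR]
  | append_singleton ys y ih =>
    rw [pvDedupR, dif_neg (by simp : ¬ ys ++ [y] = [])]
    have h1 : (ys ++ [y]).getLast! = y := by simp
    have h2 : (ys ++ [y]).dropLast = ys := by simp
    rw [h1, h2, ih, List.foldl_append]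
    rfl

-- A's step on a diagonal state (seen = kept list, as a Set it is that nodup list itself)
lemma pvStepA_diag (l : List String) (item : String)
    (hch : ∀ v : String, (PySem.Set.contains l v) = (v ∈ l)) :
    pvStepA (l, l) item = (pvStepL l (PySem.Str.strip item), pvStepL l (PySem.Str.strip item)) := by
  simp only [pvStepA, pvStepL, PySem.Set.add, hch]
  by_cases h0 : PySem.Str.strip item = ""
  · simp [h0]
  · by_cases hm : PySem.Str.strip item ∈ l <;> simp [h0, hm]

lemma pvContains_eq_mem (l : List String) (v : String) :
    (PySem.Set.contains l v) = (v ∈ l) := by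
  simp [PySem.Set.contains]

lemma pvStepL_nodup {l : List String} (hl : l.Nodup) (v : String) : (pvStepL l v).Nodup := by
  unfold pvStepL
  split
  · next h => exact List.Nodup.append hl (List.nodup_singleton v) (by simpa using fun hc => (h.2 hc).elim)
  · exact hl

-- fold of A's pair step over raw items = fold of pvStepL over stripped items, on the diagonal
lemma pvFoldA_diag (items : List String) (l : List String) (hl : l.Nodup) :
    items.foldl pvStepA (l, l)
      = ((items.map PySem.Str.strip).foldl pvStepL l,
         (items.map PySem.Str.strip).foldl pvStepL l) := by
  induction items generalizing l with
  | nil => rfl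
  | cons i t ih =>
    simp only [List.foldl_cons, List.map_cons]
    rw [pvStepA_diag l i (pvContains_eq_mem l)]
    exact ih _ (pvStepL_nodup hl _)

-- the raw (unstripped) pieces of one key
def pvRaw (data : List (String × String)) (key : String) : List String :=
  match (PySem.Dict.mk data).get? key with
  | none => []
  | some value => pvSplitComma value

-- B's piece list is the stripped flattening of the raw pieces
lemma pvPieces_eq (data : List (String × String)) (keys : List String) :
    pvPieces data keys = (keys.flatMap (pvRaw data)).map PySem.Str.strip := by
  induction keys with
  | nil => rfl
  | cons k t ih =>
    simp only [pvPieces, List.flatMap_cons, List.map_append, pvRaw]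
    cases (PySem.Dict.mk data).get? k <;> simp [ih]

-- A's nested fold over the keys is the fold over the flattened raw item list
lemma pvFold_flat (keys : List String) (data : List (String × String))
    (st : List String × PySem.Set String) :
    keys.foldl
      (fun st key =>
        match (PySem.Dict.mk data).get? key with
        | none => st
        | some value => (pvSplitComma value).foldl pvStepA st) st
    = (keys.flatMap (pvRaw data)).foldl pvStepA st := by
  induction keys generalizing st with
  | nil => rfl
  | cons k t ih =>
    simp only [List.foldl_cons, List.flatMap_cons, List.foldl_append, pvRaw]
    rw [ih]
    cases (PySem.Dict.mk data).get? k <;> rfl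

theorem parse_voice_slots_py_eq (data : List (String × String)) :
    parse_voice_slots_py data = parse_voice_slots_py_alt data := by
  unfold parse_voice_slots_py parse_voice_slots_py_alt
  rw [pvFold_flat, pvDedupR_eq_foldl, pvPieces_eq,
      show (([], PySem.Set.empty) : List String × PySem.Set String) = (([], []) : List String × PySem.Set String) from rfl,
      pvFoldA_diag _ _ List.nodup_nil]

-- ===== VERDICT (by name: the statement is the Claim_ definition above) =====
theorem parse_voice_slots_py_spec : Claim_equal_parse_voice_slots_py := by
  intro data _
  unfold Spec_parse_voice_slots_py
  exact parse_voice_slots_py_eq data
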